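-- pv_equiv track=rewrite | github.com/casualhdl/casualhdl-compiler | tokenizer.py | get_indent
-- ===== SOURCE A (Python) =====
-- def get_indent(line):
--     indent = -1
--     for i in range(0, len(line)):
--         c = line[i]
--         if c != ' ':
--             indent = i
--             break
--     return indent
-- ===== SOURCE B (Python) =====
-- def get_indent(line):
--     stripped = line.lstrip(' ')
--     if not stripped:
--         return -1
--     return len(line) - len(stripped)
-- ===== Notes on version B (the rewrite author's own statement) =====
-- stated objective: idiomatic
-- what changed: Replaces the explicit index loop with break by stripping leading spaces via lstrip and deriving the index as a length difference, returning -1 for empty or all-space lines.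
import Mathlib
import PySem

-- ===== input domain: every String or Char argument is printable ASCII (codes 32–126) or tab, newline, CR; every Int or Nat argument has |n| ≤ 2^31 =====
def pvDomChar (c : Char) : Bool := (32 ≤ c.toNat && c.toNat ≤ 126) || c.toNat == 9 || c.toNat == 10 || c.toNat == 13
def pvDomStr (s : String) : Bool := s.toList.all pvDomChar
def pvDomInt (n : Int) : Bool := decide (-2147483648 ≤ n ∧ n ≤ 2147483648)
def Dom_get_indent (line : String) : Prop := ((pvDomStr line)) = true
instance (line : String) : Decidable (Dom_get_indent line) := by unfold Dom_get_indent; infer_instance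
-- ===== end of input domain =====

-- B replaces A's explicit index loop by an lstrip-based length computation (idiomatic); same return value.
-- ===== PORT A =====
-- loop 'for i in range(0, len(line)): if line[i] != ' ': indent = i; break' as structural recursion over the chars with the running index
def getIndentLoop : List Char → Int → Int
  | [], _ => -1
  | c :: cs, i => if c ≠ ' ' then i else getIndentLoop cs (i + 1)

def get_indent (line : String) : Int := getIndentLoop line.toList 0

-- ===== PORT B =====
-- line.lstrip(' ') ported by hand as dropWhile (· == ' ') on the char list (exact: lstrip with an
-- explicit ' ' argument removes exactly the leading space characters); 'not stripped' = isEmpty.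
def get_indent_alt (line : String) : Int :=
  let stripped := line.toList.dropWhile (· == ' ')
  if stripped.isEmpty then -1 else (line.toList.length : Int) - stripped.length

-- ===== PRECONDITION & SPEC =====
def Spec_get_indent (line : String) (out : Int) : Prop := out = get_indent_alt line
instance (line : String) (out : Int) : Decidable (Spec_get_indent line out) := by unfold Spec_get_indent; infer_instance

-- ===== CLAIM (what is proved, stated in full; the proofs are below) =====
def Claim_equal_get_indent : Prop := ∀ (line : String), Dom_get_indent line → Spec_get_indent line (get_indent line)

-- ===== LEMMAS AND PROOFS =====

lemma getIndentLoop_eq (l : List Char) (i : Int) :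
    getIndentLoop l i =
      if (l.dropWhile (· == ' ')).isEmpty then -1
      else i + ((l.length : Int) - (l.dropWhile (· == ' ')).length) := by
  induction l generalizing i with
  | nil => simp [getIndentLoop]
  | cons c cs ih =>
    by_cases hc : c = ' '
    · subst hc
      rw [show getIndentLoop (' ' :: cs) i = getIndentLoop cs (i + 1) from by
            simp [getIndentLoop],
          List.dropWhile_cons_of_pos (by simp), ih]
      have hle : (cs.dropWhile (· == ' ')).length ≤ cs.length := (List.dropWhile_sublist _).length_le
      by_cases he : (cs.dropWhile (· == ' ')).isEmpty <;> simp only [he, if_true,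
        List.length_cons] <;> push_cast <;> omega
    · have hdw : List.dropWhile (fun x => x == ' ') (c :: cs) = c :: cs :=
        List.dropWhile_cons_of_neg (by simp [hc])
      simp [getIndentLoop, hc, hdw]

-- ===== VERDICT (by name: the statement is the Claim_ definition above) =====
theorem get_indent_spec : Claim_equal_get_indent := by
  intro line _
  unfold Spec_get_indent get_indent get_indent_alt
  rw [getIndentLoop_eq]
  simp
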